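-- pv_equiv track=rewrite | github.com/MarshMunHay/jane_street_puzzles | puzzles/ibm-ponder-this/202504.py | is_in_bounds
-- ===== SOURCE A (Python) =====
-- def is_in_bounds(path, g):
--     row_limit = len(g) - 1
--     col_limit = len(g[0]) - 1
--     pos = [0,0]
--     in_bounds = lambda x: (x[0] >= 0) and (x[0] <= row_limit) and (x[1] >= 0) and (x[1] <= col_limit)
--     for direction in path:
--         pos = [pos[0] + direction[0], pos[1] + direction[1]]
--         if not in_bounds(pos):
--             return False
--     return True
-- ===== SOURCE B (Python) =====
-- def is_in_bounds(path, g):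
--     if not path:
--         return True
--     rows, cols = [], []
--     r = c = 0
--     for d in path:
--         r += d[0]
--         c += d[1]
--         rows.append(r)
--         cols.append(c)
--     return (min(rows) >= 0 and max(rows) <= len(g) - 1
--             and min(cols) >= 0 and max(cols) <= len(g[0]) - 1)
-- ===== Notes on version B (the rewrite author's own statement) =====
-- stated objective: alternative
-- what changed: Instead of stepping position-by-position with an early False return on the first out-of-bounds position, B builds the lists of cumulative row and column prefix sums in one pass and decides via min/max aggregates against the grid limits.
-- outside the precondition, e.g. on is_in_bounds([[-1, 0], [5]], [[0]]): A returns False, B raises IndexError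
import Mathlib
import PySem

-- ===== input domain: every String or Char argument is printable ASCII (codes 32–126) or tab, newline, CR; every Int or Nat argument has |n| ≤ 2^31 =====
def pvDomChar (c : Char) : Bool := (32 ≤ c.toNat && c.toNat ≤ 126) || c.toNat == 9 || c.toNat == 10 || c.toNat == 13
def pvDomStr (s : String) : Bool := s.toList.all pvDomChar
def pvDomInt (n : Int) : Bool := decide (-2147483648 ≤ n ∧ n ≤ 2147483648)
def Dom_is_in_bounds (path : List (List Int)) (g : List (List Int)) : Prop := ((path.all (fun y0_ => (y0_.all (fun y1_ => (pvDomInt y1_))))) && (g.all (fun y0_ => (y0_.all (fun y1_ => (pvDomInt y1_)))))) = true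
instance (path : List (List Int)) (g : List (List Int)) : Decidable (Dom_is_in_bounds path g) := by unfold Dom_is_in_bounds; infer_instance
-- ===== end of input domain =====

-- B is a different decomposition of the same O(n) task: one pass building the
-- cumulative row/column prefix sums, then a min/max aggregate check (no early return).

-- ===== PORT A =====
-- the for-loop of A: step the position, return False on the first out-of-bounds position
def pvLoopA (rowLimit colLimit : Int) (pos : Int × Int) : List (List Int) → Bool
  | [] => true
  | d :: rest =>
    match PySem.List.pyGet? d 0, PySem.List.pyGet? d 1 with
    | some d0, some d1 =>
      let p := (pos.1 + d0, pos.2 + d1)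
      if (decide (p.1 ≥ 0) && decide (p.1 ≤ rowLimit) && decide (p.2 ≥ 0) && decide (p.2 ≤ colLimit)) then
        pvLoopA rowLimit colLimit p rest
      else false
    | _, _ => false  -- IndexError on direction[0]/direction[1]: outside Pre_

def is_in_bounds (path : List (List Int)) (g : List (List Int)) : Bool :=
  match PySem.List.pyGet? g 0 with
  | none => false  -- g[0] raises IndexError: outside Pre_
  | some g0 => pvLoopA ((g.length : Int) - 1) ((g0.length : Int) - 1) (0, 0) path

-- ===== PORT B =====
-- the for-loop of B: cumulative prefix sums of rows and columns (none = IndexError on a short direction)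
def pvPrefixB (r c : Int) : List (List Int) → Option (List Int × List Int)
  | [] => some ([], [])
  | d :: rest =>
    (PySem.List.pyGet? d 0).bind fun d0 =>
      (PySem.List.pyGet? d 1).bind fun d1 =>
        (pvPrefixB (r + d0) (c + d1) rest).map fun rc => ((r + d0) :: rc.1, (c + d1) :: rc.2)

def is_in_bounds_alt (path : List (List Int)) (g : List (List Int)) : Bool :=
  if path = [] then true
  else
    match pvPrefixB 0 0 path with
    | none => false  -- IndexError on a short direction: outside Pre_
    | some (rows, cols) =>
      match PySem.List.min? rows (fun x => x), PySem.List.max? rows (fun x => x),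
            PySem.List.min? cols (fun x => x), PySem.List.max? cols (fun x => x),
            PySem.List.pyGet? g 0 with
      | some mnr, some mxr, some mnc, some mxc, some g0 =>
        decide (mnr ≥ 0) && decide (mxr ≤ (g.length : Int) - 1) &&
        decide (mnc ≥ 0) && decide (mxc ≤ (g0.length : Int) - 1)
      | _, _, _, _, _ => false  -- unreachable inside Pre_ (rows/cols nonempty, g nonempty)

-- ===== PRECONDITION & SPEC =====
-- Pre_ excludes g = [] (A raises IndexError on g[0]) and paths containing a direction of
-- length < 2 (an IndexError in A unless an earlier step already left the grid; B, which
-- aggregates the whole path first, itself raises IndexError on every such path).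
def Pre_is_in_bounds (path : List (List Int)) (g : List (List Int)) : Prop :=
  g ≠ [] ∧ ∀ d ∈ path, 2 ≤ d.length
instance (path : List (List Int)) (g : List (List Int)) : Decidable (Pre_is_in_bounds path g) := by unfold Pre_is_in_bounds; infer_instance

def pvWitness_is_in_bounds : List (List Int) × List (List Int) :=
  ([[0, 1], [1, 0]], [[0, 0], [0, 0]])

def Spec_is_in_bounds (path : List (List Int)) (g : List (List Int)) (out : Bool) : Prop := out = is_in_bounds_alt path g
instance (path : List (List Int)) (g : List (List Int)) (out : Bool) : Decidable (Spec_is_in_bounds path g out) := by unfold Spec_is_in_bounds; infer_instance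

-- ===== CLAIM (what is proved, stated in full; the proofs are below) =====
def Claim_equal_is_in_bounds : Prop := ∀ (path : List (List Int)) (g : List (List Int)), Dom_is_in_bounds path g → Pre_is_in_bounds path g → Spec_is_in_bounds path g (is_in_bounds path g)

-- ===== LEMMAS AND PROOFS =====

-- on a path of directions of length ≥ 2, the prefix-sum pass succeeds and produces
-- one row/column entry per step
theorem pvPrefixB_some (path : List (List Int)) :
    (∀ d ∈ path, 2 ≤ d.length) → ∀ (r c : Int),
    ∃ rows cols, pvPrefixB r c path = some (rows, cols) ∧
      rows.length = path.length ∧ cols.length = path.length := by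
  induction path with
  | nil => intro _ r c; exact ⟨[], [], rfl, rfl, rfl⟩
  | cons d rest ih =>
    intro h r c
    have hd : 2 ≤ d.length := h d (by simp)
    obtain ⟨d0, d1, t, rfl⟩ : ∃ d0 d1 t, d = d0 :: d1 :: t := by
      cases d with
      | nil => simp at hd
      | cons d0 t =>
        cases t with
        | nil => simp at hd
        | cons d1 t' => exact ⟨d0, d1, t', rfl⟩
    have h0 : PySem.List.pyGet? (d0 :: d1 :: t) 0 = some d0 := PySem.List.pyGet?_zero_cons ..
    have h1 : PySem.List.pyGet? (d0 :: d1 :: t) 1 = some d1 := by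
      simpa using PySem.List.pyGet?_cons_succ d0 (d1 :: t) 0
    obtain ⟨rs, cs, hrec, hlr, hlc⟩ := ih (fun x hx => h x (by simp [hx])) (r + d0) (c + d1)
    exact ⟨(r + d0) :: rs, (c + d1) :: cs, by simp [pvPrefixB, h0, hrec], by simp [hlr], by simp [hlc]⟩

-- A's early-return loop equals the conjunction of bounds tests over the prefix sums
theorem loopA_eq_all (rl cl : Int) (path : List (List Int)) : ∀ (r c : Int) (rows cols : List Int),
    pvPrefixB r c path = some (rows, cols) →
    pvLoopA rl cl (r, c) path =
      (rows.all (fun x => decide (x ≥ 0) && decide (x ≤ rl)) &&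
       cols.all (fun x => decide (x ≥ 0) && decide (x ≤ cl))) := by
  induction path with
  | nil =>
    intro r c rows cols h
    simp only [pvPrefixB] at h
    obtain ⟨h1, h2⟩ := Prod.mk.injEq .. ▸ Option.some.injEq .. ▸ h
    subst h1; subst h2; rfl
  | cons d rest ih =>
    intro r c rows cols h
    simp only [pvPrefixB] at h
    cases h0 : PySem.List.pyGet? d 0 with
    | none => rw [h0] at h; cases h
    | some d0 =>
      cases h1 : PySem.List.pyGet? d 1 with
      | none => rw [h0, h1] at h; cases h
      | some d1 =>
        rw [h0, h1] at h
        simp only [Option.bind_some] at h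
        cases hrec : pvPrefixB (r + d0) (c + d1) rest with
        | none => rw [hrec] at h; cases h
        | some p =>
          obtain ⟨rs, cs⟩ := p
          rw [hrec] at h
          simp only [Option.map_some, Option.some.injEq, Prod.mk.injEq] at h
          obtain ⟨hrows, hcols⟩ := h
          subst hrows; subst hcols
          simp only [pvLoopA, h0, h1, List.all_cons]
          by_cases hb : (decide (r + d0 ≥ 0) && decide (r + d0 ≤ rl) && decide (c + d1 ≥ 0) && decide (c + d1 ≤ cl)) = true
          · rw [if_pos hb]
            rw [ih (r + d0) (c + d1) rs cs hrec]
            simp only [Bool.and_eq_true, decide_eq_true_eq] at hb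
            obtain ⟨⟨⟨b1, b2⟩, b3⟩, b4⟩ := hb
            simp [b1, b2, b3, b4, Bool.and_comm]
          · rw [if_neg hb]
            simp only [Bool.and_eq_true, decide_eq_true_eq, not_and] at hb
            by_cases b1 : r + d0 ≥ 0 <;> by_cases b2 : r + d0 ≤ rl <;>
              by_cases b3 : c + d1 ≥ 0 <;> by_cases b4 : c + d1 ≤ cl <;>
              simp_all

-- min ≥ lo together with max ≤ hi is exactly "all elements within [lo, hi]"
theorem minmax_all (xs : List Int) (lo hi mn mx : Int)
    (hmn : PySem.List.min? xs (fun x => x) = some mn)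
    (hmx : PySem.List.max? xs (fun x => x) = some mx) :
    (decide (mn ≥ lo) && decide (mx ≤ hi)) =
      xs.all (fun x => decide (x ≥ lo) && decide (x ≤ hi)) := by
  rw [Bool.eq_iff_iff]
  simp only [Bool.and_eq_true, decide_eq_true_eq, List.all_eq_true]
  constructor
  · rintro ⟨h1, h2⟩ x hx
    exact ⟨le_trans h1 (PySem.List.min?_isMin hmn x hx), le_trans (PySem.List.max?_isMax hmx x hx) h2⟩
  · intro h
    exact ⟨(h mn (PySem.List.min?_mem hmn)).1, (h mx (PySem.List.max?_mem hmx)).2⟩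

-- ===== VERDICT (by name: the statement is the Claim_ definition above) =====
theorem is_in_bounds_spec : Claim_equal_is_in_bounds := by
  intro path g _ hpre
  obtain ⟨hg, hdirs⟩ := hpre
  unfold Spec_is_in_bounds
  obtain ⟨g0, gs, rfl⟩ : ∃ g0 gs, g = g0 :: gs := by
    cases g with
    | nil => exact absurd rfl hg
    | cons a b => exact ⟨a, b, rfl⟩
  have hg0 : PySem.List.pyGet? (g0 :: gs) 0 = some g0 := PySem.List.pyGet?_zero_cons ..
  cases path with
  | nil =>
    simp [is_in_bounds, is_in_bounds_alt, pvLoopA]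
  | cons d rest =>
    obtain ⟨rows, cols, hpre', hlr, hlc⟩ := pvPrefixB_some (d :: rest) hdirs 0 0
    have hrne : rows ≠ [] := by intro h; simp [h] at hlr
    have hcne : cols ≠ [] := by intro h; simp [h] at hlc
    obtain ⟨mnr, hmnr⟩ : ∃ m, PySem.List.min? rows (fun x => x) = some m := by
      cases hm : PySem.List.min? rows (fun x => x) with
      | none => exact absurd (((PySem.List.min?_eq_none_iff _ _).mp hm)) hrne
      | some m => exact ⟨m, rfl⟩
    obtain ⟨mxr, hmxr⟩ : ∃ m, PySem.List.max? rows (fun x => x) = some m := by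
      cases hm : PySem.List.max? rows (fun x => x) with
      | none => exact absurd (((PySem.List.max?_eq_none_iff _ _).mp hm)) hrne
      | some m => exact ⟨m, rfl⟩
    obtain ⟨mnc, hmnc⟩ : ∃ m, PySem.List.min? cols (fun x => x) = some m := by
      cases hm : PySem.List.min? cols (fun x => x) with
      | none => exact absurd (((PySem.List.min?_eq_none_iff _ _).mp hm)) hcne
      | some m => exact ⟨m, rfl⟩
    obtain ⟨mxc, hmxc⟩ : ∃ m, PySem.List.max? cols (fun x => x) = some m := by
      cases hm : PySem.List.max? cols (fun x => x) with
      | none => exact absurd (((PySem.List.max?_eq_none_iff _ _).mp hm)) hcne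
      | some m => exact ⟨m, rfl⟩
    rw [show is_in_bounds (d :: rest) (g0 :: gs) =
        pvLoopA ((((g0 :: gs).length : Int)) - 1) (((g0.length : Int)) - 1) (0, 0) (d :: rest) by
      simp [is_in_bounds]]
    rw [loopA_eq_all _ _ _ 0 0 rows cols hpre']
    rw [show is_in_bounds_alt (d :: rest) (g0 :: gs) =
        (decide (mnr ≥ 0) && decide (mxr ≤ (((g0 :: gs).length : Int)) - 1) &&
         (decide (mnc ≥ 0) && decide (mxc ≤ ((g0.length : Int)) - 1))) by
      simp [is_in_bounds_alt, hpre', hmnr, hmxr, hmnc, hmxc, Bool.and_assoc]]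
    rw [minmax_all rows 0 _ mnr mxr hmnr hmxr, minmax_all cols 0 _ mnc mxc hmnc hmxc]
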